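-- pv_equiv track=rewrite | github.com/dansasser/SIM-ONE | code/mcp_server/protocols/governance/five_laws_validator/law2_cognitive_governance.py | _count_reliability_mechanisms
-- ===== SOURCE A (Python) =====
-- from typing import Dict, Any, List, Optional, Set
--
-- def _count_reliability_mechanisms(protocol_stack: List[str]) -> int:
--     """Count the number of reliability enforcement mechanisms"""
--
--     reliability_mechanisms = 0
--
--     # Check for specific reliability protocols
--     reliability_indicators = [
--         "DeterministicReliability", "ErrorEvaluation", "Consistency",
--         "Validation", "Verification", "Reliability"
--     ]
--
--     for indicator in reliability_indicators:
--         if any(indicator in protocol for protocol in protocol_stack):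
--             reliability_mechanisms += 1
--
--     return reliability_mechanisms
-- ===== SOURCE B (Python) =====
-- def _count_reliability_mechanisms(protocol_stack):
--     """Count the number of reliability enforcement mechanisms"""
--
--     reliability_indicators = [
--         "DeterministicReliability", "ErrorEvaluation", "Consistency",
--         "Validation", "Verification", "Reliability"
--     ]
--
--     # single stack-major pass over a shrinking candidate list: each indicator is
--     # tested only until its first match, then dropped; stop once none remain
--     count = 0
--     remaining = reliability_indicators
--     for head in protocol_stack:
--         if not remaining:
--             break
--         count += sum(1 for ind in remaining if ind in head)
--         remaining = [ind for ind in remaining if ind not in head]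
--     return count
-- ===== Notes on version B (the rewrite author's own statement) =====
-- stated objective: alternative
-- what changed: Replaces the indicator-major counter with an inner any() scan by a single stack-major pass over a shrinking candidate list: at each protocol the remaining indicators are partitioned into matched (counted and dropped) and unmatched (carried on), and the loop breaks once no candidates remain.
import Mathlib
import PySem

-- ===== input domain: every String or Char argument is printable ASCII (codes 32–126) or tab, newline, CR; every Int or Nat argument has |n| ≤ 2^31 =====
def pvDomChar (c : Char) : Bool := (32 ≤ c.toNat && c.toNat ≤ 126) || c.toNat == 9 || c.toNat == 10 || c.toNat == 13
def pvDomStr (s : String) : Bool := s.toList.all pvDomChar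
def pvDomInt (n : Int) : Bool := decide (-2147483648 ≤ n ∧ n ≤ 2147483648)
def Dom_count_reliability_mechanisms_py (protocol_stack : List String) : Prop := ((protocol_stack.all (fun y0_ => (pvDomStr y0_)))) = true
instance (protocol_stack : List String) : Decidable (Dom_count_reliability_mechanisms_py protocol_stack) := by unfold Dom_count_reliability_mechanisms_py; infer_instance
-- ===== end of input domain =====

-- B replaces A's indicator-major counter (an any() scan per fixed indicator) by one stack-major
-- pass over a shrinking candidate list: at each protocol the remaining indicators are partitioned
-- into matched (counted, dropped) and unmatched (carried on), breaking early (objective: alternative).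

-- ===== PORT A =====
def count_reliability_mechanisms_py (protocol_stack : List String) : Int :=
  let reliability_indicators : List String :=
    ["DeterministicReliability", "ErrorEvaluation", "Consistency",
     "Validation", "Verification", "Reliability"]
  reliability_indicators.foldl
    (fun reliability_mechanisms indicator =>
      if protocol_stack.any (fun protocol => PySem.Str.isIn indicator protocol)
      then reliability_mechanisms + 1 else reliability_mechanisms) 0

-- ===== PORT B =====
-- the loop over the stack: state = (count so far, remaining candidates); break on empty remaining
def pvCountLoop : List String → List String → Int → Int
  | [], _, count => count
  | _ :: _, [], count => count
  | head :: tail, remaining@(_ :: _), count =>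
      pvCountLoop tail (remaining.filter (fun ind => ! PySem.Str.isIn ind head))
        (count + (remaining.countP (fun ind => PySem.Str.isIn ind head) : Int))

def count_reliability_mechanisms_py_alt (protocol_stack : List String) : Int :=
  let reliability_indicators : List String :=
    ["DeterministicReliability", "ErrorEvaluation", "Consistency",
     "Validation", "Verification", "Reliability"]
  pvCountLoop protocol_stack reliability_indicators 0

-- ===== PRECONDITION & SPEC =====
def Spec_count_reliability_mechanisms_py (protocol_stack : List String) (out : Int) : Prop := out = count_reliability_mechanisms_py_alt protocol_stack
instance (protocol_stack : List String) (out : Int) : Decidable (Spec_count_reliability_mechanisms_py protocol_stack out) := by unfold Spec_count_reliability_mechanisms_py; infer_instance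

-- ===== CLAIM (what is proved, stated in full; the proofs are below) =====
def Claim_equal_count_reliability_mechanisms_py : Prop := ∀ (protocol_stack : List String), Dom_count_reliability_mechanisms_py protocol_stack → Spec_count_reliability_mechanisms_py protocol_stack (count_reliability_mechanisms_py protocol_stack)

-- ===== LEMMAS AND PROOFS =====

-- splitting a disjunctive countP: count (a ∨ b) = count a + count (¬a ∧ b)
theorem pv_countP_or (l : List String) (a b : String → Bool) :
    l.countP (fun i => a i || b i) = l.countP a + l.countP (fun i => !a i && b i) := by
  induction l with
  | nil => rfl
  | cons x t ih =>
    simp only [List.countP_cons, ih]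
    by_cases h : a x = true <;> simp [h] <;> omega

-- B's loop adds to its accumulator exactly the remaining indicators contained in some protocol
theorem pv_countLoop_eq (stack : List String) : ∀ (remaining : List String) (count : Int),
    pvCountLoop stack remaining count =
      count + (remaining.countP (fun ind => stack.any (fun p => PySem.Str.isIn ind p)) : Int) := by
  induction stack with
  | nil => intro rem count; simp [pvCountLoop]
  | cons head tail ih =>
    intro rem count
    match rem with
    | [] => simp [pvCountLoop]
    | i :: is =>
      simp only [pvCountLoop, ih, List.countP_filter, List.any_cons]
      rw [pv_countP_or (i :: is) (fun ind => PySem.Str.isIn ind head)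
            (fun ind => tail.any (fun p => PySem.Str.isIn ind p))]
      push_cast
      ring_nf
      congr 2
      exact List.countP_congr (fun x _ => by rw [Bool.and_comm])

-- ===== VERDICT (by name: the statement is the Claim_ definition above) =====
theorem count_reliability_mechanisms_py_spec : Claim_equal_count_reliability_mechanisms_py := by
  intro stack _
  unfold Spec_count_reliability_mechanisms_py
  unfold count_reliability_mechanisms_py count_reliability_mechanisms_py_alt
  simp only [pv_countLoop_eq, PySem.List.foldl_count_if, zero_add]
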